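-- pv_equiv track=rewrite | github.com/TanguyBellec/linkedin-api-find-a-job | my_functions/utils.py | is_profile_data_or_finance
-- ===== SOURCE A (Python) =====
-- def is_profile_data_or_finance(profile, data_keywords = ['tech','data','engineer', 'analyst', 'analytics'] , quant_finance_keywords = ['quantitative', 'finance', 'fintech', 'financial', 'hft', 'hedge', 'asset']):
--
--     count_data = 0
--     count_quant = 0
--
--     # Some recruiters don't have a summary, in this case we take the title
--     try:
--         summary = profile['summary'].lower()
--
--     except KeyError:
--         summary = profile['headline'].lower()
--
--     summary = summary.split(" ")
--
--     for word in summary: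
--
--         if(word in data_keywords):
--             count_data += 1
--
--         if(word in quant_finance_keywords):
--             count_quant += 1
--
--     if(count_quant > count_data):
--         return 'finance'
--
--     if(count_data > 0):
--         return 'data'
--
--     return 'NA'
-- ===== SOURCE B (Python) =====
-- def is_profile_data_or_finance(profile, data_keywords = ['tech','data','engineer', 'analyst', 'analytics'] , quant_finance_keywords = ['quantitative', 'finance', 'fintech', 'financial', 'hft', 'hedge', 'asset']):
--     # Some recruiters don't have a summary, in this case we take the title
--     key = 'summary' if 'summary' in profile else 'headline'
--     words = profile[key].lower().split(' ')
--     count_data = sum(words.count(k) for k in dict.fromkeys(data_keywords))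
--     count_quant = sum(words.count(k) for k in dict.fromkeys(quant_finance_keywords))
--     return 'finance' if count_quant > count_data else ('data' if count_data > 0 else 'NA')
-- ===== Notes on version B (the rewrite author's own statement) =====
-- stated objective: alternative
-- what changed: B selects the field by a containment check instead of try/except and counts occurrences of each deduplicated keyword in the word list (keyword-major pass with list.count), instead of A's word-major loop testing membership in both keyword lists with two running counters.
import Mathlib
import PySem

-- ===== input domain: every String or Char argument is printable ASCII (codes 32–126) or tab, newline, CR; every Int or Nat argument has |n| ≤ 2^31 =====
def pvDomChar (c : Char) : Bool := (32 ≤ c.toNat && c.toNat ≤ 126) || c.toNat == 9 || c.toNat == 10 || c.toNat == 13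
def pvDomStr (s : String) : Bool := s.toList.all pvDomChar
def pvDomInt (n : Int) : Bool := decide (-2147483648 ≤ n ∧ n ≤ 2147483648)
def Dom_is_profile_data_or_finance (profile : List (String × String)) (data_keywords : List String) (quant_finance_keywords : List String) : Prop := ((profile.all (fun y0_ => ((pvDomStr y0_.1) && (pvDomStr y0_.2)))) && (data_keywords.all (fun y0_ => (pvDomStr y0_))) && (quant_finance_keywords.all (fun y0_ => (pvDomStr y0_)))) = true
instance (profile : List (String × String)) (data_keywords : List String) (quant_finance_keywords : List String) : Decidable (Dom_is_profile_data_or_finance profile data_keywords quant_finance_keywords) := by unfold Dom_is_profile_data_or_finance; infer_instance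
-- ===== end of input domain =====

-- B selects the field by a containment check instead of try/except and counts each deduplicated
-- keyword's occurrences in the word list (keyword-major), instead of A's word-major membership loop.


-- ===== PORT A =====
def is_profile_data_or_finance (profile : List (String × String)) (data_keywords : List String) (quant_finance_keywords : List String) : String :=
  let d := PySem.Dict.ofList profile
  -- try: profile['summary'].lower()  except KeyError: profile['headline'].lower()
  let summary? : Option String :=
    match d.get? "summary" with
    | some s => some (PySem.Str.lower s)
    | none =>
      match d.get? "headline" with
      | some s => some (PySem.Str.lower s)
      | none => none          -- KeyError: excluded by Pre_
  match summary? with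
  | none => ""                -- unreachable under Pre_
  | some summary =>
    let words := (PySem.Str.split? summary " ").getD []
    let counts := words.foldl (fun (acc : Int × Int) word =>
      let acc := if word ∈ data_keywords then (acc.1 + 1, acc.2) else acc
      if word ∈ quant_finance_keywords then (acc.1, acc.2 + 1) else acc) (0, 0)
    if counts.2 > counts.1 then "finance"
    else if counts.1 > 0 then "data"
    else "NA"

-- ===== PORT B =====
def is_profile_data_or_finance_alt (profile : List (String × String)) (data_keywords : List String) (quant_finance_keywords : List String) : String :=
  let d := PySem.Dict.ofList profile
  -- key = 'summary' if 'summary' in profile else 'headline'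
  let key := if d.contains "summary" then "summary" else "headline"
  match d.get? key with
  | none => ""                -- KeyError on profile[key]: excluded by Pre_
  | some raw =>
    let words := (PySem.Str.split? (PySem.Str.lower raw) " ").getD []
    let count_data := ((PySem.List.dedup data_keywords).map (fun k => (words.count k : Int))).sum
    let count_quant := ((PySem.List.dedup quant_finance_keywords).map (fun k => (words.count k : Int))).sum
    if count_quant > count_data then "finance"
    else if count_data > 0 then "data"
    else "NA"

-- ===== PRECONDITION & SPEC =====
-- A raises KeyError when the profile has neither a 'summary' nor a 'headline' key; Pre_ excludes exactly those.
def Pre_is_profile_data_or_finance (profile : List (String × String)) (data_keywords : List String) (quant_finance_keywords : List String) : Prop :=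
  ((PySem.Dict.ofList profile).contains "summary" || (PySem.Dict.ofList profile).contains "headline") = true
instance (profile : List (String × String)) (data_keywords : List String) (quant_finance_keywords : List String) : Decidable (Pre_is_profile_data_or_finance profile data_keywords quant_finance_keywords) := by unfold Pre_is_profile_data_or_finance; infer_instance
def pvWitness_is_profile_data_or_finance : (List (String × String)) × List String × List String :=
  ([("summary", "data and finance work")], ["data"], ["finance"])

def Spec_is_profile_data_or_finance (profile : List (String × String)) (data_keywords : List String) (quant_finance_keywords : List String) (out : String) : Prop := out = is_profile_data_or_finance_alt profile data_keywords quant_finance_keywords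
instance (profile : List (String × String)) (data_keywords : List String) (quant_finance_keywords : List String) (out : String) : Decidable (Spec_is_profile_data_or_finance profile data_keywords quant_finance_keywords out) := by unfold Spec_is_profile_data_or_finance; infer_instance

-- ===== CLAIM (what is proved, stated in full; the proofs are below) =====
def Claim_equal_is_profile_data_or_finance : Prop := ∀ (profile : List (String × String)) (data_keywords : List String) (quant_finance_keywords : List String), Dom_is_profile_data_or_finance profile data_keywords quant_finance_keywords → Pre_is_profile_data_or_finance profile data_keywords quant_finance_keywords → Spec_is_profile_data_or_finance profile data_keywords quant_finance_keywords (is_profile_data_or_finance profile data_keywords quant_finance_keywords)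

-- ===== LEMMAS AND PROOFS =====

-- sum of a 0/1 indicator over a duplicate-free list
lemma sum_indicator_nodup (S : List String) (hS : S.Nodup) (w : String) :
    (S.map (fun k => if w = k then (1 : Int) else 0)).sum = if w ∈ S then 1 else 0 := by
  induction S with
  | nil => simp
  | cons a S ih =>
    rcases List.nodup_cons.mp hS with ⟨ha, hS'⟩
    by_cases h : w = a
    · subst h
      simp [List.sum_cons, ih hS', ha]
    · simp [List.sum_cons, ih hS', h]

-- A's per-word membership count equals B's sum of per-keyword occurrence counts (dedup keywords)
lemma count_core (words L : List String) :
    ((words.countP (fun w => decide (w ∈ L)) : Nat) : Int)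
      = ((PySem.List.dedup L).map (fun k => (words.count k : Int))).sum := by
  induction words with
  | nil => simp
  | cons w ws ih =>
    have hsplit : ((PySem.List.dedup L).map (fun k => ((w :: ws).count k : Int))).sum
        = ((PySem.List.dedup L).map (fun k => (ws.count k : Int))).sum
          + ((PySem.List.dedup L).map (fun k => if w = k then (1 : Int) else 0)).sum := by
      rw [← List.sum_map_add]
      congr 1
      refine List.map_congr_left fun k _ => ?_
      by_cases h : w = k <;> simp [h]
    rw [List.countP_cons, hsplit,
        sum_indicator_nodup _ (PySem.List.nodup_dedup L) w, ← ih]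
    by_cases h : w ∈ L <;> simp [h]

-- A's fold computes the two countP values
lemma foldA (dk qk : List String) (words : List String) (a b : Int) :
    words.foldl (fun (acc : Int × Int) word =>
      let acc := if word ∈ dk then (acc.1 + 1, acc.2) else acc
      if word ∈ qk then (acc.1, acc.2 + 1) else acc) (a, b)
      = (a + (words.countP (fun w => decide (w ∈ dk)) : Nat),
         b + (words.countP (fun w => decide (w ∈ qk)) : Nat)) := by
  induction words generalizing a b with
  | nil => simp
  | cons w ws ih =>
    simp only [List.foldl_cons, List.countP_cons]
    by_cases h1 : w ∈ dk <;> by_cases h2 : w ∈ qk <;>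
      simp [h1, h2, ih, Prod.ext_iff] <;> omega

-- ===== VERDICT (by name: the statement is the Claim_ definition above) =====
theorem is_profile_data_or_finance_spec : Claim_equal_is_profile_data_or_finance := by
  intro profile dk qk _hDom hPre
  show _ = _
  unfold is_profile_data_or_finance is_profile_data_or_finance_alt
  rcases hs : (PySem.Dict.ofList profile).get? "summary" with _ | s <;>
  rcases hh : (PySem.Dict.ofList profile).get? "headline" with _ | h
  case none.none =>
    exfalso
    unfold Pre_is_profile_data_or_finance at hPre
    simp [PySem.Dict.contains_eq_isSome_get?, hs, hh] at hPre
  all_goals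
    simp only [PySem.Dict.contains_eq_isSome_get?, hs, hh, Option.isSome, if_true, if_false,
      Bool.false_eq_true]
    generalize ((PySem.Str.split? _ " ").getD []) = words
    rw [foldA]
    simp only [zero_add, count_core words dk, count_core words qk]
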